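-- pv_equiv track=rewrite | github.com/d4nieldev/apt-bron-re | tests/ner_test.py | unify_categories
-- ===== SOURCE A (Python) =====
-- CATEGORY_MAP = {
--     # collapse to TECHNIQUE
--     "TECHNIQUE": "TECHNIQUE",
--     "OS": "TECHNIQUE",
--     "PROTOCOL": "TECHNIQUE",
--     "PROGRAMMING_LANGUAGE": "TECHNIQUE",
--     # collapse to GROUP
--     "THREAT_ACTOR": "GROUP",
--     # collapse to SOFTWARE
--     "SOFTWARE": "SOFTWARE",
--     "SECURITY_PRODUCT": "SOFTWARE",
--     "PRODUCT": "SOFTWARE",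
-- }
--
-- def unify_categories(tag_dict: dict[str, list[str]]) -> dict[str, list[str]]:
--     """
--     Post-processes the raw tag output:
--     • Maps categories according to CATEGORY_MAP
--     • Puts everything else under 'OTHER'
--     • Removes duplicates while preserving the original order
--     """
--     unified: dict[str, list[str]] = {}
--
--     def _add(cat: str, value: str) -> None:
--         if cat not in unified:
--             unified[cat] = []
--         # keep order but avoid duplicates
--         if value not in unified[cat]:
--             unified[cat].append(value)
--
--     for orig_cat, values in tag_dict.items():
--         new_cat = CATEGORY_MAP.get(orig_cat, "OTHER")
--         for v in values:
--             _add(new_cat, v)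
--
--     return unified
-- ===== SOURCE B (Python) =====
-- CATEGORY_MAP = {
--     "TECHNIQUE": "TECHNIQUE",
--     "OS": "TECHNIQUE",
--     "PROTOCOL": "TECHNIQUE",
--     "PROGRAMMING_LANGUAGE": "TECHNIQUE",
--     "THREAT_ACTOR": "GROUP",
--     "SOFTWARE": "SOFTWARE",
--     "SECURITY_PRODUCT": "SOFTWARE",
--     "PRODUCT": "SOFTWARE",
-- }
--
-- def unify_categories(tag_dict: dict[str, list[str]]) -> dict[str, list[str]]:
--     # Phase 1: group all values under their mapped category (skip empty lists,
--     # which never create a key). Phase 2: order-preserving dedup per category.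
--     grouped: dict[str, list[str]] = {}
--     for orig_cat, values in tag_dict.items():
--         if not values:
--             continue
--         grouped.setdefault(CATEGORY_MAP.get(orig_cat, "OTHER"), []).extend(values)
--     return {cat: list(dict.fromkeys(vals)) for cat, vals in grouped.items()}
-- ===== Notes on version B (the rewrite author's own statement) =====
-- stated objective: faster
-- what changed: Replaces A's per-value dedup-on-insert (a linear 'value not in unified[cat]' list scan for every value) by a two-phase decomposition: one pass grouping all values per mapped category, then one dict comprehension deduplicating each group with hashed dict.fromkeys.
import Mathlib
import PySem

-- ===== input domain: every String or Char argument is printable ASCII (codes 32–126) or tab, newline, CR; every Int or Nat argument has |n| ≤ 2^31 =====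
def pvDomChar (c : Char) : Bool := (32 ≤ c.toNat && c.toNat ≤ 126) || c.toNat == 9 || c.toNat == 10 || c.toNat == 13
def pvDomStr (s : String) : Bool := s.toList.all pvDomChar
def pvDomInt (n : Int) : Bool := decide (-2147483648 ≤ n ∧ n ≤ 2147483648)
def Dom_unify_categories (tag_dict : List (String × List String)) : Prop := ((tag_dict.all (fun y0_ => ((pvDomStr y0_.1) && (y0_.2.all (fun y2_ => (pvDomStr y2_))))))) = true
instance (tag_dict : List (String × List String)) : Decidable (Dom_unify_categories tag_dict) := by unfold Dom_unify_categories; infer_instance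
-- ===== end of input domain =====

-- B re-decomposes A's per-value dedup-on-insert (a list-membership scan per value) into
-- group-all-values-first, then one hashed order-preserving dedup per category (faster).

-- ===== PORT A =====
def CATEGORY_MAP : PySem.Dict String String :=
  PySem.Dict.ofList
    [("TECHNIQUE", "TECHNIQUE"), ("OS", "TECHNIQUE"), ("PROTOCOL", "TECHNIQUE"),
     ("PROGRAMMING_LANGUAGE", "TECHNIQUE"), ("THREAT_ACTOR", "GROUP"),
     ("SOFTWARE", "SOFTWARE"), ("SECURITY_PRODUCT", "SOFTWARE"), ("PRODUCT", "SOFTWARE")]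

-- the nested helper `_add` of A (mutation of `unified` becomes state-passing)
def unifyAdd (unified : PySem.Dict String (List String)) (cat v : String) :
    PySem.Dict String (List String) :=
  let u := if unified.contains cat then unified else unified.insert cat []
  if v ∈ u.getD cat [] then u else u.insert cat (u.getD cat [] ++ [v])

def unify_categories (tag_dict : List (String × List String)) : List (String × List String) :=
  (tag_dict.foldl
    (fun unified p =>
      let new_cat := CATEGORY_MAP.getD p.1 "OTHER"
      p.2.foldl (fun unified v => unifyAdd unified new_cat v) unified)
    PySem.Dict.empty).items

-- ===== PORT B =====
def unify_categories_alt (tag_dict : List (String × List String)) : List (String × List String) :=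
  let grouped := tag_dict.foldl
    (fun g p =>
      if p.2.isEmpty then g
      else g.modify (CATEGORY_MAP.getD p.1 "OTHER") [] (fun vs => vs ++ p.2))
    PySem.Dict.empty
  grouped.items.map (fun p => (p.1, PySem.List.dedup p.2))

-- ===== PRECONDITION & SPEC =====
def Spec_unify_categories (tag_dict : List (String × List String)) (out : List (String × List String)) : Prop := out = unify_categories_alt tag_dict
instance (tag_dict : List (String × List String)) (out : List (String × List String)) : Decidable (Spec_unify_categories tag_dict out) := by unfold Spec_unify_categories; infer_instance

-- ===== CLAIM (what is proved, stated in full; the proofs are below) =====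
def Claim_equal_unify_categories : Prop := ∀ (tag_dict : List (String × List String)), Dom_unify_categories tag_dict → Spec_unify_categories tag_dict (unify_categories tag_dict)

-- ===== LEMMAS AND PROOFS =====

-- the value-wise dedup of a grouping dict: A's state is exactly this image of B's state
def mapDedup (g : PySem.Dict String (List String)) : PySem.Dict String (List String) :=
  PySem.Dict.mk (g.items.map (fun p => (p.1, PySem.List.dedup p.2)))

theorem contains_mapDedup (g : PySem.Dict String (List String)) (c : String) :
    (mapDedup g).contains c = g.contains c := by
  simp [mapDedup, PySem.Dict.contains, List.any_map, Function.comp_def]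

theorem get?_mapDedup (g : PySem.Dict String (List String)) (c : String) :
    (mapDedup g).get? c = (g.get? c).map PySem.List.dedup := by
  simp [mapDedup, PySem.Dict.get?, List.find?_map, Function.comp_def, Option.map_map]

theorem modify_modify (d : PySem.Dict String (List String)) (k : String)
    (f h : List String → List String) :
    (d.modify k [] f).modify k [] h = d.modify k [] (fun x => h (f x)) := by
  simp [PySem.Dict.modify, PySem.Dict.getD_insert_self, PySem.Dict.insert_insert_self]

theorem nodup_keys_modify (d : PySem.Dict String (List String)) (k : String)
    (f : List String → List String) (hnd : d.keys.Nodup) :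
    (d.modify k [] f).keys.Nodup := by
  simpa [PySem.Dict.modify] using PySem.Dict.nodup_keys_insert d k _ hnd

set_option maxHeartbeats 1000000 in
theorem unifyAdd_mapDedup (g : PySem.Dict String (List String)) (hnd : g.keys.Nodup)
    (c v : String) :
    unifyAdd (mapDedup g) c v = mapDedup (g.modify c [] (fun L => L ++ [v])) := by
  unfold unifyAdd
  cases hb : g.contains c with
  | false =>
    -- fresh key: both sides append (c, [v])
    have hb' : (mapDedup g).contains c = false := by rw [contains_mapDedup, hb]
    simp only [hb', if_neg Bool.false_ne_true]
    rw [PySem.Dict.getD_insert_self, PySem.Dict.insert_insert_self]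
    simp only [List.not_mem_nil, if_false, List.nil_append]
    rw [PySem.Dict.modify, PySem.Dict.getD_of_not_contains g ([]) hb, List.nil_append]
    apply PySem.Dict.ext
    rw [PySem.Dict.items_insert_of_not_contains _ _ hb']
    show _ = (mapDedup (g.insert c [v])).items
    simp [mapDedup, PySem.Dict.items_insert_of_not_contains _ _ hb]
    simp [pysem]
  | true =>
    have hb' : (mapDedup g).contains c = true := by rw [contains_mapDedup, hb]
    obtain ⟨L, hL⟩ : ∃ L, g.get? c = some L := by
      rw [PySem.Dict.contains_eq_isSome_get?] at hb
      exact Option.isSome_iff_exists.mp hb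
    have hgD : g.getD c [] = L := PySem.Dict.getD_of_get?_eq_some _ _ hL
    have hmD : (mapDedup g).getD c [] = PySem.List.dedup L := by
      simp [PySem.Dict.getD_eq_get?_getD, get?_mapDedup, hL]
    have hitem : ∀ p ∈ g.items, p.1 = c → p = (c, L) := by
      intro p hp hpc
      have := PySem.Dict.get?_of_mem_items (d := g) (k := p.1) (v := p.2) (by simpa using hp) hnd
      rw [hpc, hL] at this
      cases p; simp_all
    rw [PySem.Dict.modify, hgD]
    simp only [hb', if_pos, hmD]
    by_cases hv : v ∈ L
    · have hv2 : v ∈ PySem.List.dedup L := by simp [pysem, hv]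
      simp only [hv2, if_pos]
      apply PySem.Dict.ext
      simp only [mapDedup, PySem.Dict.items_insert_of_contains _ _ hb, List.map_map]
      symm
      apply List.map_congr_left
      intro p hp
      by_cases hpc : p.1 = c
      · have := hitem p hp hpc; subst this
        have h3 : PySem.Set.ofList (L ++ [v]) = PySem.Set.ofList L := by
          simp [pysem, PySem.Set.add, hv]
        simp [h3]
      · simp [hpc]
    · have hv2 : v ∉ PySem.List.dedup L := by simp [pysem, hv]
      simp only [hv2, if_neg, not_false_iff]
      apply PySem.Dict.ext
      rw [PySem.Dict.items_insert_of_contains _ _ hb']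
      simp only [mapDedup, PySem.Dict.items_insert_of_contains _ _ hb, List.map_map]
      apply List.map_congr_left
      intro p hp
      by_cases hpc : p.1 = c
      · have := hitem p hp hpc; subst this
        have h3 : PySem.Set.ofList (L ++ [v]) = PySem.Set.ofList L ++ [v] := by
          simp [pysem, PySem.Set.add, hv]
        simp [h3]
      · simp [hpc]

theorem foldAdd_mapDedup (vs : List String) (c : String)
    (g : PySem.Dict String (List String)) (hnd : g.keys.Nodup) :
    vs.foldl (fun u v => unifyAdd u c v) (mapDedup g) =
      mapDedup (if vs.isEmpty then g else g.modify c [] (fun L => L ++ vs)) := by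
  induction vs generalizing g with
  | nil => simp
  | cons v vs ih =>
    simp only [List.foldl_cons, List.isEmpty_cons, if_neg Bool.false_ne_true]
    rw [unifyAdd_mapDedup g hnd c v, ih _ (nodup_keys_modify g c _ hnd)]
    cases vs with
    | nil => simp
    | cons w ws =>
      simp only [List.isEmpty_cons, if_neg Bool.false_ne_true, modify_modify]
      congr 1
      congr 1
      funext L
      simp

theorem foldMain (l : List (String × List String))
    (g : PySem.Dict String (List String)) (hnd : g.keys.Nodup) :
    l.foldl
      (fun unified p =>
        let new_cat := CATEGORY_MAP.getD p.1 "OTHER"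
        p.2.foldl (fun unified v => unifyAdd unified new_cat v) unified)
      (mapDedup g) =
    mapDedup (l.foldl
      (fun g p =>
        if p.2.isEmpty then g
        else g.modify (CATEGORY_MAP.getD p.1 "OTHER") [] (fun vs => vs ++ p.2)) g) := by
  induction l generalizing g with
  | nil => rfl
  | cons p l ih =>
    simp only [List.foldl_cons]
    rw [foldAdd_mapDedup p.2 _ g hnd]
    cases he : p.2.isEmpty with
    | true => simp only [if_true]; exact ih g hnd
    | false =>
      simp only [Bool.false_eq_true, if_false]
      exact ih _ (nodup_keys_modify g _ _ hnd)

-- ===== VERDICT (by name: the statement is the Claim_ definition above) =====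
theorem unify_categories_spec : Claim_equal_unify_categories := by
  intro tag_dict _
  unfold Spec_unify_categories unify_categories unify_categories_alt
  have h := foldMain tag_dict PySem.Dict.empty (by simp [PySem.Dict.keys, PySem.Dict.empty])
  rw [show (PySem.Dict.empty : PySem.Dict String (List String)) = mapDedup PySem.Dict.empty from rfl, h]
  rfl
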